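-- pv_equiv track=rewrite | github.com/sketchychen/phrase-count | phrase_count.py | fragment_sentence_by_word
-- ===== SOURCE A (Python) =====
-- def fragment_sentence_by_word(sentence, word_list):
--   # input string and list, return list
--     fragments = [sentence]
--     for word in word_list: # iterate through each word in word_list
--       for frag in fragments: # iterate through each "frag" (starts with a "full" sentence)
--         if word in frag.split():
--           temp = frag.split()
--           temp = temp[:temp.index(word)], temp[temp.index(word)+1:]
--           # IGNORE FRAGMENTS WITH WORD LENGTH < 3 WORDS (phrases are 3-10 words long)
--           fragments = [" ".join(words) for words in temp if len(words) >= 3]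
--     return fragments
-- ===== SOURCE B (Python) =====
-- def fragment_sentence_by_word(sentence, word_list):
--     # Scan current fragments back-to-front and split only on the first match
--     # (= A's "last matching fragment wins"), instead of overwriting mid-loop.
--     fragments = [sentence]
--     for word in word_list:
--         for frag in reversed(fragments):
--             words = frag.split()
--             if word in words:
--                 i = words.index(word)
--                 pieces = (words[:i], words[i + 1:])
--                 fragments = [" ".join(p) for p in pieces if len(p) >= 3]
--                 break
--     return fragments
-- ===== Notes on version B (the rewrite author's own statement) =====
-- stated objective: simpler
-- what changed: Instead of repeatedly overwriting `fragments` while iterating the stale snapshot, B scans the fragments back-to-front and splits only the first (i.e. last) matching fragment, breaking immediately; the split/index/filter work is done once per word instead of once per matching fragment.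
import Mathlib
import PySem

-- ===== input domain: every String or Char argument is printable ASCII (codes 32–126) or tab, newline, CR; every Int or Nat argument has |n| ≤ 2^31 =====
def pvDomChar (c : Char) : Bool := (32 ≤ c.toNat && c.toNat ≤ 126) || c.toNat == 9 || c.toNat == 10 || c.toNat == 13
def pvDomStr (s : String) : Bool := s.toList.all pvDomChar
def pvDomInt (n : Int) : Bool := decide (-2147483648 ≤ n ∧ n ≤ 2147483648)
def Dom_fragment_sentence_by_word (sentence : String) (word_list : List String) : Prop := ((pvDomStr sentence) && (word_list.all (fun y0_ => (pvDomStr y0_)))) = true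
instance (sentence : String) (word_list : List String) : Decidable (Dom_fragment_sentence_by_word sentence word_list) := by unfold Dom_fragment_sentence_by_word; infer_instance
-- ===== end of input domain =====

-- B scans fragments back-to-front and splits only the first (= last) matching fragment,
-- instead of A's overwrite-inside-the-loop over a stale snapshot; return values proved equal.

-- ===== PORT A =====
-- A's body for a matching frag: temp = frag.split(); temp.index(word) computed twice
-- (word ∈ temp is guaranteed at the call site, so index? is some and .getD 0 is exact).
def pvAUpdate (word frag : String) : List String :=
  let temp := PySem.Str.split₀ frag
  ((([PySem.List.slice temp none (some (((PySem.List.index? temp word).getD 0 : Nat) : Int)),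
      PySem.List.slice temp (some ((((PySem.List.index? temp word).getD 0 : Nat) : Int) + 1)) none]).filter
      (fun ws => decide (3 ≤ ws.length))).map (fun ws => PySem.Str.join " " ws))

def fragment_sentence_by_word (sentence : String) (word_list : List String) : List String :=
  word_list.foldl (fun fragments word =>
    -- 'for frag in fragments' iterates the snapshot; reassigning fragments only changes the accumulator
    fragments.foldl (fun acc frag =>
      if word ∈ PySem.Str.split₀ frag then pvAUpdate word frag else acc) fragments) [sentence]

-- ===== PORT B =====
-- 'for frag in reversed(fragments): … break' = first match in the reversed list
def pvAltFind (word : String) : List String → Option String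
  | [] => none
  | f :: r => if word ∈ PySem.Str.split₀ f then some f else pvAltFind word r

def pvAltUpdate (word frag : String) : List String :=
  let ws := PySem.Str.split₀ frag
  let i : Nat := (PySem.List.index? ws word).getD 0   -- word ∈ ws at the call site, so index? is some
  (([PySem.List.slice ws none (some (i : Int)),
     PySem.List.slice ws (some ((i : Int) + 1)) none]).filter
     (fun p => decide (3 ≤ p.length))).map (fun p => PySem.Str.join " " p)

def fragment_sentence_by_word_alt (sentence : String) (word_list : List String) : List String :=
  word_list.foldl (fun fragments word =>
    match pvAltFind word fragments.reverse with
    | some frag => pvAltUpdate word frag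
    | none => fragments) [sentence]

-- ===== PRECONDITION & SPEC =====
def Spec_fragment_sentence_by_word (sentence : String) (word_list : List String) (out : List String) : Prop := out = fragment_sentence_by_word_alt sentence word_list
instance (sentence : String) (word_list : List String) (out : List String) : Decidable (Spec_fragment_sentence_by_word sentence word_list out) := by unfold Spec_fragment_sentence_by_word; infer_instance

-- ===== CLAIM (what is proved, stated in full; the proofs are below) =====
def Claim_equal_fragment_sentence_by_word : Prop := ∀ (sentence : String) (word_list : List String), Dom_fragment_sentence_by_word sentence word_list → Spec_fragment_sentence_by_word sentence word_list (fragment_sentence_by_word sentence word_list)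

-- ===== LEMMAS AND PROOFS =====

theorem pvAUpdate_eq_pvAltUpdate (word frag : String) : pvAUpdate word frag = pvAltUpdate word frag := rfl

theorem pvAltFind_append_singleton (word a : String) (xs : List String) :
    pvAltFind word (xs ++ [a]) =
      (match pvAltFind word xs with
       | some f => some f
       | none => if word ∈ PySem.Str.split₀ a then some a else none) := by
  induction xs with
  | nil => simp [pvAltFind]
  | cons x xs ih =>
      simp only [List.cons_append, pvAltFind]
      by_cases h : word ∈ PySem.Str.split₀ x
      · simp [h]
      · simp [h, ih]

theorem foldl_eq_find (word : String) (l : List String) (init : List String) :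
    l.foldl (fun acc frag => if word ∈ PySem.Str.split₀ frag then pvAUpdate word frag else acc) init =
      (match pvAltFind word l.reverse with
       | some f => pvAltUpdate word f
       | none => init) := by
  induction l generalizing init with
  | nil => simp [pvAltFind]
  | cons a l ih =>
      simp only [List.foldl_cons, List.reverse_cons, ih, pvAltFind_append_singleton]
      by_cases h : word ∈ PySem.Str.split₀ a <;>
        cases hf : pvAltFind word l.reverse <;>
        simp [h, pvAUpdate_eq_pvAltUpdate]

-- ===== VERDICT (by name: the statement is the Claim_ definition above) =====
theorem fragment_sentence_by_word_spec : Claim_equal_fragment_sentence_by_word := by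
  intro sentence word_list _
  unfold Spec_fragment_sentence_by_word fragment_sentence_by_word fragment_sentence_by_word_alt
  congr 1
  funext fragments word
  exact foldl_eq_find word fragments fragments
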